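-- pv_equiv track=rewrite | github.com/nicain/python-practice | before_and_after_puzzle.py | answer
-- ===== SOURCE A (Python) =====
-- import collections
--
-- def answer(phrases):
--   first_word_to_phrase_dict = collections.defaultdict(list)
--   last_word_to_phrase_dict = collections.defaultdict(list)
--   for pi, phrase in enumerate(phrases):
--     words = phrase.split()
--     first_word_to_phrase_dict[words[0]].append((words, pi))
--     last_word_to_phrase_dict[words[-1]].append((words[:-1], pi))
--
--   final_phrase_list = []
--   for key, words_list in last_word_to_phrase_dict.items():
--     for words, pi1 in words_list:
--       for matching_words, pi2 in first_word_to_phrase_dict[key]: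
--         if pi1 != pi2:
--           final_phrase_list.append(' '.join(words+matching_words))
--   return sorted(set(final_phrase_list))
-- ===== SOURCE B (Python) =====
-- def answer(phrases):
--   splits = [phrase.split() for phrase in phrases]
--   result = []
--   for i in range(len(splits)):
--     for j in range(len(splits)):
--       if i != j and splits[i][-1] == splits[j][0]:
--         result.append(' '.join(splits[i][:-1] + splits[j]))
--   return sorted(set(result))
-- ===== Notes on version B (the rewrite author's own statement) =====
-- stated objective: simpler
-- what changed: B drops A's two word-indexed bucket dictionaries and instead splits each phrase once and scans all ordered index pairs (i, j) directly, joining when splits[i][-1] == splits[j][0]; the final sorted(set(...)) makes the traversal orders agree.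
import Mathlib
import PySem

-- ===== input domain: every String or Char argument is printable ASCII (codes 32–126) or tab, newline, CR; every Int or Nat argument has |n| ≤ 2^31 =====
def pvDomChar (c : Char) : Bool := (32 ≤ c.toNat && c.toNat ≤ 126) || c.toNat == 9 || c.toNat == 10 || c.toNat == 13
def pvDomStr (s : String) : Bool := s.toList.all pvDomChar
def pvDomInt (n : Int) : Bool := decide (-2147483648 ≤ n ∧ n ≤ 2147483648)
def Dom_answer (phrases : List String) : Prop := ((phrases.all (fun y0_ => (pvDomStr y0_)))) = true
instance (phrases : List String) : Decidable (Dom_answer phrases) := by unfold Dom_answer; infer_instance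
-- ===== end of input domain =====

-- B replaces A's two word-indexed bucket dicts by a single direct scan over all ordered
-- index pairs (simpler, no dictionaries); equal output on every input where A returns.

-- ===== PORT A =====
def answer (phrases : List String) : List String :=
  let dicts := (PySem.List.enumerate phrases).foldl
    (fun (st : PySem.Dict String (List (List String × Int)) × PySem.Dict String (List (List String × Int)))
         (p : Int × String) =>
      let words := PySem.Str.split₀ p.2
      (st.1.modify (PySem.List.pyGetD words 0 "") [] (· ++ [(words, p.1)]),
       st.2.modify (PySem.List.pyGetD words (-1) "") []
         (· ++ [(PySem.List.slice words none (some (-1)), p.1)])))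
    (PySem.Dict.empty, PySem.Dict.empty)
  let final := dicts.2.items.foldl (fun acc kv =>
    kv.2.foldl (fun acc wp =>
      (dicts.1.getD kv.1 []).foldl (fun acc mp =>
        if wp.2 ≠ mp.2 then acc ++ [PySem.Str.join " " (wp.1 ++ mp.1)] else acc) acc) acc) []
  PySem.List.sorted (PySem.Set.ofList final) (fun x => x) false

-- ===== PORT B =====
def answer_alt (phrases : List String) : List String :=
  let splits := phrases.map PySem.Str.split₀
  let result := (PySem.List.pyRange 0 (splits.length : Int) 1).foldl (fun acc i =>
    (PySem.List.pyRange 0 (splits.length : Int) 1).foldl (fun acc j =>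
      if i ≠ j ∧ PySem.List.pyGetD (PySem.List.pyGetD splits i []) (-1) ""
               = PySem.List.pyGetD (PySem.List.pyGetD splits j []) 0 "" then
        acc ++ [PySem.Str.join " "
          (PySem.List.slice (PySem.List.pyGetD splits i []) none (some (-1))
            ++ PySem.List.pyGetD splits j [])]
      else acc) acc) []
  PySem.List.sorted (PySem.Set.ofList result) (fun x => x) false

-- ===== PRECONDITION & SPEC =====
-- Pre_ excludes exactly the inputs where the Python A raises IndexError: any phrase that
-- splits to no words (empty or all-whitespace) makes A's words[0]/words[-1] fail.
def Pre_answer (phrases : List String) : Prop :=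
  ∀ s ∈ phrases, PySem.Str.split₀ s ≠ []
instance (phrases : List String) : Decidable (Pre_answer phrases) := by unfold Pre_answer; infer_instance
def pvWitness_answer : List String := ["a b", "b c"]

def Spec_answer (phrases : List String) (out : List String) : Prop := out = answer_alt phrases
instance (phrases : List String) (out : List String) : Decidable (Spec_answer phrases out) := by unfold Spec_answer; infer_instance

-- ===== CLAIM (what is proved, stated in full; the proofs are below) =====
def Claim_equal_answer : Prop := ∀ (phrases : List String), Dom_answer phrases → Pre_answer phrases → Spec_answer phrases (answer phrases)

-- ===== LEMMAS AND PROOFS =====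

theorem bucket_getD {β ν : Type} (l : List β) (key : β → String) (val : β → ν) (c : String) :
    (List.foldl (fun d p => d.modify (key p) [] fun x => x ++ [val p]) PySem.Dict.empty l).getD c []
      = List.map val (List.filter (fun p => key p == c) l) := by
  have h := PySem.Dict.getD_foldl_modify_append (List.map (fun p => (key p, val p)) l) PySem.Dict.empty c
  rw [List.foldl_map] at h
  simpa [List.filter_map, List.map_map, Function.comp] using h

theorem mem_flatMap_items {ν : Type} (d : PySem.Dict String (List ν)) (hnd : d.keys.Nodup)
    (F : String × List ν → ν → List String) (x : String) :
    x ∈ List.flatMap (fun kv => List.flatMap (fun wp => F kv wp) kv.2) d.items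
      ↔ ∃ k wp, wp ∈ d.getD k [] ∧ x ∈ F (k, d.getD k []) wp := by
  simp only [List.mem_flatMap]
  constructor
  · rintro ⟨kv, hkv, wp, hwp, hx⟩
    have hget := PySem.Dict.get?_of_mem_items d (k := kv.1) (v := kv.2) (by simpa using hkv) hnd
    have hgd : d.getD kv.1 [] = kv.2 := by rw [PySem.Dict.getD_eq_get?_getD, hget]; rfl
    refine ⟨kv.1, wp, hgd ▸ hwp, ?_⟩
    have : (kv.1, d.getD kv.1 []) = kv := by rw [hgd]
    rwa [this]
  · rintro ⟨k, wp, hwp, hx⟩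
    by_cases hc : d.contains k = true
    · have hs : (d.get? k).isSome := by rw [← PySem.Dict.contains_eq_isSome_get?]; exact hc
      obtain ⟨v, hv⟩ := Option.isSome_iff_exists.mp hs
      have hgd : d.getD k [] = v := by rw [PySem.Dict.getD_eq_get?_getD, hv]; rfl
      refine ⟨(k, v), PySem.Dict.mem_items_of_get?_eq_some d hv, wp, ?_, ?_⟩
      · rwa [hgd] at hwp
      · rwa [hgd] at hx
    · rw [PySem.Dict.getD_of_not_contains d [] (by simpa using hc)] at hwp
      cases hwp

theorem sortedSetExt {l1 l2 : List String} (h : ∀ x, x ∈ l1 ↔ x ∈ l2) :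
    PySem.List.sorted (PySem.Set.ofList l1) (fun x => x) false
      = PySem.List.sorted (PySem.Set.ofList l2) (fun x => x) false := by
  apply PySem.List.sorted_eq_sorted_of_perm _ _ _ (fun a b hh => hh)
  rw [List.perm_ext_iff_of_nodup (PySem.Set.nodup_ofList _) (PySem.Set.nodup_ofList _)]
  intro x; simp only [PySem.Set.mem_ofList]; exact h x

theorem answer_eq (phrases : List String) : answer phrases = answer_alt phrases := by
  simp only [answer, answer_alt]
  rw [PySem.List.foldl_prod_mk
    (f := fun (d : PySem.Dict String (List (List String × Int))) (p : Int × String) =>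
      d.modify (PySem.List.pyGetD (PySem.Str.split₀ p.2) 0 "") [] (· ++ [(PySem.Str.split₀ p.2, p.1)]))
    (g := fun (d : PySem.Dict String (List (List String × Int))) (p : Int × String) =>
      d.modify (PySem.List.pyGetD (PySem.Str.split₀ p.2) (-1) "") []
        (· ++ [(PySem.List.slice (PySem.Str.split₀ p.2) none (some (-1)), p.1)]))]
  apply sortedSetExt
  intro x
  simp only [PySem.List.foldl_append_ite, PySem.List.foldl_append_eq_flatMap, List.nil_append]
  refine Iff.trans (mem_flatMap_items _ ?_ _ x) ?_
  · exact PySem.Dict.nodup_keys_foldl_modify_key _ _ _ _ _ (by simp)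
  simp only [bucket_getD, List.mem_flatMap, List.mem_map, List.mem_filter,
    decide_eq_true_eq, PySem.List.mem_pyRange_one, PySem.List.mem_enumerate_iff]
  simp only [zero_add, beq_iff_eq, List.length_map]
  have hg : ∀ n : Nat, n < phrases.length →
      PySem.List.pyGetD (List.map PySem.Str.split₀ phrases) (↑n) [] = PySem.Str.split₀ (phrases[n]!) := by
    intro n hn
    rw [PySem.List.pyGetD_natCast]
    simp [List.getD_eq_getElem?_getD, List.getElem?_map,
      List.getElem!_eq_getElem?_getD, List.getElem?_eq_getElem hn]
  constructor
  · rintro ⟨k, wp, ⟨a, ⟨⟨i, hi, rfl⟩, hk1⟩, rfl⟩, mp, ⟨⟨b, ⟨⟨j, hj, rfl⟩, hk2⟩, rfl⟩, hne⟩, rfl⟩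
    dsimp only at hk1 hk2 hne ⊢
    refine ⟨(i : Int), ⟨by positivity, by exact_mod_cast hi⟩, (j : Int),
      ⟨⟨by positivity, by exact_mod_cast hj⟩, ?_, ?_⟩, ?_⟩
    · exact_mod_cast fun h => hne (by exact_mod_cast h)
    · rw [hg i hi, hg j hj]
      simp only [List.getElem!_eq_getElem?_getD, List.getElem?_eq_getElem hi,
        List.getElem?_eq_getElem hj, Option.getD_some]
      rw [hk1, hk2]
    · rw [hg i hi, hg j hj]
      simp only [List.getElem!_eq_getElem?_getD, List.getElem?_eq_getElem hi,
        List.getElem?_eq_getElem hj, Option.getD_some]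
  · rintro ⟨i, ⟨h0, hlt⟩, j, ⟨⟨h0', hlt'⟩, hij, hkey⟩, rfl⟩
    have hiN : i.toNat < phrases.length := by omega
    have hjN : j.toNat < phrases.length := by omega
    have hi' : (i.toNat : Int) = i := Int.toNat_of_nonneg h0
    have hj' : (j.toNat : Int) = j := Int.toNat_of_nonneg h0'
    rw [← hi', ← hj'] at hkey ⊢
    rw [hg i.toNat hiN, hg j.toNat hjN] at hkey ⊢
    refine ⟨PySem.List.pyGetD (PySem.Str.split₀ (phrases[i.toNat]!)) (-1) "",
      (PySem.List.slice (PySem.Str.split₀ (phrases[i.toNat]!)) none (some (-1)), (i.toNat : Int)),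
      ⟨(↑i.toNat, phrases[i.toNat]), ⟨⟨i.toNat, hiN, rfl⟩, ?_⟩, ?_⟩,
      (PySem.Str.split₀ (phrases[j.toNat]!), (j.toNat : Int)),
      ⟨⟨(↑j.toNat, phrases[j.toNat]), ⟨⟨j.toNat, hjN, rfl⟩, ?_⟩, ?_⟩, ?_⟩, rfl⟩
    · simp [List.getElem!_eq_getElem?_getD, List.getElem?_eq_getElem hiN]
    · simp [List.getElem!_eq_getElem?_getD, List.getElem?_eq_getElem hiN]
    · rw [hkey]
      simp [List.getElem!_eq_getElem?_getD, List.getElem?_eq_getElem hjN]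
    · simp [List.getElem!_eq_getElem?_getD, List.getElem?_eq_getElem hjN]
    · dsimp only
      exact fun h => hij (by rw [← hi', ← hj', h])

-- ===== VERDICT (by name: the statement is the Claim_ definition above) =====
theorem answer_spec : Claim_equal_answer := by
  intro phrases _ _
  exact answer_eq phrases
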